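-- pv_equiv track=rewrite | github.com/pypi-data/pypi-mirror-97 | packages/ukrainian/ukrainian-0.0.2-py3-none-any.whl/ukrainian/__init__.py | page_divide
-- ===== SOURCE A (Python) =====
-- def page_divide(content_list,wordcount):
--     word_i = 0
--     pages = []
--     page = ""
--     for x in content_list:
--         page += x[0]
--         if x[1] == "word":
--             word_i += 1
--         if word_i > wordcount:
--             if x[0] == "</p>":
--                 pages.append(page)
--                 page = ""
--                 word_i = 0
--     pages.append(page)
--     return(pages)
-- ===== SOURCE B (Python) =====
-- def page_divide(content_list, wordcount):
--     # Pass 1: split into segments ending at a '</p>' element, plus a trailing segment.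
--     segments = []
--     texts = []
--     words = 0
--     for t, k in content_list:
--         texts.append(t)
--         if k == "word":
--             words += 1
--         if t == "</p>":
--             segments.append(("".join(texts), words, True))
--             texts = []
--             words = 0
--     segments.append(("".join(texts), words, False))
--     # Pass 2: greedily pack segments into pages.
--     pages = []
--     page = ""
--     word_i = 0
--     for text, wcnt, ends_par in segments:
--         page += text
--         word_i += wcnt
--         if ends_par and word_i > wordcount:
--             pages.append(page)
--             page = ""
--             word_i = 0
--     pages.append(page)
--     return pages
-- ===== Notes on version B (the rewrite author's own statement) =====
-- stated objective: alternative
-- what changed: B replaces A's single element-wise loop by two passes: first split the content into '</p>'-terminated segments with precomputed text and word counts, then greedily pack those segments into pages.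
import Mathlib
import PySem

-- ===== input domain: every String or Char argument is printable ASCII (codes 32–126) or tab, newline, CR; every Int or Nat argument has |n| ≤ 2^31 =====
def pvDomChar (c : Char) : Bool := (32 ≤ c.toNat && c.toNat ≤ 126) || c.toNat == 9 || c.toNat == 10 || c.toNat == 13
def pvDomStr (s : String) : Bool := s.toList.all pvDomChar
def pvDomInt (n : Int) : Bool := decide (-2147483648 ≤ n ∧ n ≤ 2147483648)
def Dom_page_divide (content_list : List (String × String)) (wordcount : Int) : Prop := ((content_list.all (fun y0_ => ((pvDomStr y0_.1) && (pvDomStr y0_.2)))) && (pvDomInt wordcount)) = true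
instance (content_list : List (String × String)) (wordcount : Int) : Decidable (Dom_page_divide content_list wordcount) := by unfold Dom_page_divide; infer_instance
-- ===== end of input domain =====

-- B re-implements A by a two-pass decomposition (segment at '</p>', then pack segments); equal return value, no speed claim.

-- ===== PORT A =====
-- the for-loop of A, state (word_i, pages, page), branches in source order
def pageDivideLoopA (wordcount : Int) : List (String × String) → Int → List String → String → List String
  | [], _, pages, page => pages ++ [page]
  | x :: rest, word_i, pages, page =>
    let page' := page ++ x.1
    let word_i' := if x.2 = "word" then word_i + 1 else word_i
    if word_i' > wordcount then
      if x.1 = "</p>" then pageDivideLoopA wordcount rest 0 (pages ++ [page']) ""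
      else pageDivideLoopA wordcount rest word_i' pages page'
    else pageDivideLoopA wordcount rest word_i' pages page'

def page_divide (content_list : List (String × String)) (wordcount : Int) : List String :=
  pageDivideLoopA wordcount content_list 0 [] ""

-- ===== PORT B =====
-- pass 1 of Source B: split into '</p>'-terminated segments, state (texts, words)
def pageSegLoopB : List (String × String) → List String → Int → List (String × Int × Bool)
  | [], texts, words => [(String.join texts, words, false)]
  | (t, k) :: rest, texts, words =>
    let texts' := texts ++ [t]
    let words' := if k = "word" then words + 1 else words
    if t = "</p>" then (String.join texts', words', true) :: pageSegLoopB rest [] 0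
    else pageSegLoopB rest texts' words'

-- pass 2 of Source B: pack segments into pages, state (pages, page, word_i)
def pagePackLoopB (wordcount : Int) : List (String × Int × Bool) → List String → String → Int → List String
  | [], pages, page, _ => pages ++ [page]
  | (text, wcnt, ends_par) :: rest, pages, page, word_i =>
    let page' := page ++ text
    let word_i' := word_i + wcnt
    if ends_par ∧ word_i' > wordcount then pagePackLoopB wordcount rest (pages ++ [page']) "" 0
    else pagePackLoopB wordcount rest pages page' word_i'

def page_divide_alt (content_list : List (String × String)) (wordcount : Int) : List String :=
  pagePackLoopB wordcount (pageSegLoopB content_list [] 0) [] "" 0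

-- ===== PRECONDITION & SPEC =====
def Spec_page_divide (content_list : List (String × String)) (wordcount : Int) (out : List String) : Prop := out = page_divide_alt content_list wordcount
instance (content_list : List (String × String)) (wordcount : Int) (out : List String) : Decidable (Spec_page_divide content_list wordcount out) := by unfold Spec_page_divide; infer_instance

-- ===== CLAIM (what is proved, stated in full; the proofs are below) =====
def Claim_equal_page_divide : Prop := ∀ (content_list : List (String × String)) (wordcount : Int), Dom_page_divide content_list wordcount → Spec_page_divide content_list wordcount (page_divide content_list wordcount)

-- ===== LEMMAS AND PROOFS =====

theorem join_nil : String.join ([] : List String) = "" := rfl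

theorem join_snoc (l : List String) (s : String) : String.join (l ++ [s]) = String.join l ++ s := by
  simp [String.join, List.foldl_append]

-- A's loop, started mid-segment, equals B's pack loop on the remaining segments.
theorem loop_eq (wc : Int) (l : List (String × String)) :
    ∀ (texts : List String) (words wi : Int) (pages : List String) (page : String),
    pageDivideLoopA wc l (wi + words) pages (page ++ String.join texts)
      = pagePackLoopB wc (pageSegLoopB l texts words) pages page wi := by
  induction l with
  | nil =>
    intro texts words wi pages page
    simp [pageDivideLoopA, pageSegLoopB, pagePackLoopB]
  | cons x rest ih =>
    intro texts words wi pages page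
    obtain ⟨t, k⟩ := x
    by_cases hp : t = "</p>"
    · subst hp
      by_cases hw : k = "word"
      · subst hw
        by_cases hc : wi + (words + 1) > wc
        · have h2 := ih [] 0 0 (pages ++ [page ++ (String.join texts ++ "</p>")]) ""
          simpa [pageDivideLoopA, pageSegLoopB, pagePackLoopB, join_snoc, join_nil,
                 String.append_assoc, add_assoc, add_zero, hc] using h2
        · have h2 := ih [] 0 (wi + (words + 1)) pages (page ++ (String.join texts ++ "</p>"))
          simpa [pageDivideLoopA, pageSegLoopB, pagePackLoopB, join_snoc, join_nil,
                 String.append_assoc, add_assoc, add_zero, hc] using h2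
      · by_cases hc : wi + words > wc
        · have h2 := ih [] 0 0 (pages ++ [page ++ (String.join texts ++ "</p>")]) ""
          simpa [pageDivideLoopA, pageSegLoopB, pagePackLoopB, join_snoc, join_nil,
                 String.append_assoc, add_assoc, add_zero, hw, hc] using h2
        · have h2 := ih [] 0 (wi + words) pages (page ++ (String.join texts ++ "</p>"))
          simpa [pageDivideLoopA, pageSegLoopB, pagePackLoopB, join_snoc, join_nil,
                 String.append_assoc, add_assoc, add_zero, hw, hc] using h2
    · by_cases hw : k = "word"
      · subst hw
        have h2 := ih (texts ++ [t]) (words + 1) wi pages page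
        simpa [pageDivideLoopA, pageSegLoopB, join_snoc, String.append_assoc,
               add_assoc, hp, ite_self] using h2
      · have h2 := ih (texts ++ [t]) words wi pages page
        simpa [pageDivideLoopA, pageSegLoopB, join_snoc, String.append_assoc,
               hp, hw, ite_self] using h2

-- ===== VERDICT (by name: the statement is the Claim_ definition above) =====
theorem page_divide_spec : Claim_equal_page_divide := by
  intro content_list wordcount _
  unfold Spec_page_divide page_divide page_divide_alt
  simpa [join_nil] using loop_eq wordcount content_list [] 0 0 [] ""
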